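-- pv_equiv track=rewrite | github.com/adithya225/fypadm | app.py | predictunivcanada
-- ===== SOURCE A (Python) =====
-- def predictunivcanada(n):
--     lsca = ["Brock University, St. Catharines",
--             "Cape Breton University, Sydney",
--             "Carleton University, Ottawa",
--             "Concordia University, Montreal",
--             "Dalhousie University, Halifax",
--             "HEC Montreal, Montreal",
--             "Ivey Business School, Toronto",
--             "Lakehead University, Thunder Bay",
--             "McGill University, Montreal",
--             "McMaster University, Hamilton",
--             "Queens University School of Business, Kingston",
--             "University of Ottawa, Ottawa",
--             "University of Toronto, Toronto",
--             "York University, Toronto"]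
--
--     k = ""
--
--     if n >= 70 and n <= 100:
--         for i in range(70, 98):
--             if n > i and n < i + 2:
--                 k += lsca[i - 70]
--                 break
--     else:
--         k += "No admission For you"
--     return k
-- ===== SOURCE B (Python) =====
-- def predictunivcanada(n):
--     lsca = ["Brock University, St. Catharines",
--             "Cape Breton University, Sydney",
--             "Carleton University, Ottawa",
--             "Concordia University, Montreal",
--             "Dalhousie University, Halifax",
--             "HEC Montreal, Montreal",
--             "Ivey Business School, Toronto",
--             "Lakehead University, Thunder Bay",
--             "McGill University, Montreal",
--             "McMaster University, Hamilton",
--             "Queens University School of Business, Kingston",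
--             "University of Ottawa, Ottawa",
--             "University of Toronto, Toronto",
--             "York University, Toronto"]
--     if n < 70 or n > 100:
--         return "No admission For you"
--     if 71 <= n <= 84:
--         return lsca[n - 71]
--     return ""
-- ===== Notes on version B (the rewrite author's own statement) =====
-- stated objective: simpler
-- what changed: Replaces the linear scan over range(70, 98) (whose guard n>i and n<i+2 just means n=i+1) and string accumulation with a direct range test and constant-time list lookup lsca[n-71].
import Mathlib
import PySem

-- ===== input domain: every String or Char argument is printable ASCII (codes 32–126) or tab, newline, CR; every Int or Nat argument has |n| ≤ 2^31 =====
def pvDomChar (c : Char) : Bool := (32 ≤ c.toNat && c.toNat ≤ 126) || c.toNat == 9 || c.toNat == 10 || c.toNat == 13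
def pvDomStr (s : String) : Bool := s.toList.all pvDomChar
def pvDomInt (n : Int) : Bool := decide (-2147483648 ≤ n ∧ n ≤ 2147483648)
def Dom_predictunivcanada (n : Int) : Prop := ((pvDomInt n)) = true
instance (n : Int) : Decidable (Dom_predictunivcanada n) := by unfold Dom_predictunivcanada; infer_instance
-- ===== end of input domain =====

-- B replaces A's 28-step scan and string accumulation with a direct range test and lsca[n-71] lookup (simpler; same cost).


def lscaList : List String :=
  ["Brock University, St. Catharines",
   "Cape Breton University, Sydney",
   "Carleton University, Ottawa",
   "Concordia University, Montreal",
   "Dalhousie University, Halifax",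
   "HEC Montreal, Montreal",
   "Ivey Business School, Toronto",
   "Lakehead University, Thunder Bay",
   "McGill University, Montreal",
   "McMaster University, Hamilton",
   "Queens University School of Business, Kingston",
   "University of Ottawa, Ottawa",
   "University of Toronto, Toronto",
   "York University, Toronto"]

-- ===== PORT A =====
-- loop with break modelled as a fold over (state, done); lsca[i-70] via pyGet? (none = IndexError, excluded by Pre_)
def predictunivcanada (n : Int) : String :=
  let k := ""
  if n ≥ 70 ∧ n ≤ 100 then
    ((PySem.List.pyRange 70 98 1).foldl
      (fun (s : String × Bool) i =>
        if s.2 then s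
        else if n > i ∧ n < i + 2 then
          (s.1 ++ (PySem.List.pyGet? lscaList (i - 70)).getD "", true)
        else s) (k, false)).1
  else k ++ "No admission For you"

-- ===== PORT B =====
def predictunivcanada_alt (n : Int) : String :=
  if n < 70 ∨ n > 100 then "No admission For you"
  else if 71 ≤ n ∧ n ≤ 84 then (PySem.List.pyGet? lscaList (n - 71)).getD ""
  else ""

-- ===== PRECONDITION & SPEC =====
-- Pre_ excludes exactly n ∈ 85..98, where A raises IndexError (lsca has only 14 entries).
def Pre_predictunivcanada (n : Int) : Prop := ¬ (85 ≤ n ∧ n ≤ 98)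
instance (n : Int) : Decidable (Pre_predictunivcanada n) := by unfold Pre_predictunivcanada; infer_instance
def pvWitness_predictunivcanada : Int := 72

def Spec_predictunivcanada (n : Int) (out : String) : Prop := out = predictunivcanada_alt n
instance (n : Int) (out : String) : Decidable (Spec_predictunivcanada n out) := by unfold Spec_predictunivcanada; infer_instance

-- ===== CLAIM =====
def Claim_equal_predictunivcanada : Prop := ∀ (n : Int), Dom_predictunivcanada n → Pre_predictunivcanada n → Spec_predictunivcanada n (predictunivcanada n)

-- ===== LEMMAS AND PROOFS =====

-- ===== VERDICT =====
theorem predictunivcanada_spec : Claim_equal_predictunivcanada := by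
  intro n _ hp
  unfold Spec_predictunivcanada
  by_cases h : 70 ≤ n ∧ n ≤ 100
  · unfold Pre_predictunivcanada at hp
    obtain ⟨h1, h2⟩ := h
    interval_cases n <;> simp_all <;> rfl
  · have h1 : n < 70 ∨ n > 100 := by omega
    simp only [predictunivcanada, predictunivcanada_alt, if_neg (by omega : ¬ (n ≥ 70 ∧ n ≤ 100)), if_pos h1]
    rfl
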